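-- pv_equiv track=rewrite | github.com/akikuno/DAJIN2 | src/DAJIN2/core/clustering/past/find_knockin_loci.py | replaceNtoMatch
-- ===== SOURCE A (Python) =====
-- from copy import deepcopy
--
-- def replaceNtoMatch(cssplit: list[str], sequence) -> list[str]:
--     cssplit_replaced = deepcopy(cssplit)
--     # Replace N to @ at the left ends
--     for i, cs in enumerate(cssplit_replaced):
--         if cs != "N":
--             break
--         cssplit_replaced[i] = "=" + sequence[i]
--     # Replace N to @ at the right ends
--     cssplit_replaced = cssplit_replaced[::-1]
--     for i, cs in enumerate(cssplit_replaced):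
--         if cs != "N":
--             break
--         cssplit_replaced[i] = "=" + sequence[::-1][i]
--     cssplit_replaced = cssplit_replaced[::-1]
--     return cssplit_replaced
-- ===== SOURCE B (Python) =====
-- def replaceNtoMatch(cssplit: list[str], sequence) -> list[str]:
--     # Single forward pass with a state machine: while in the leading phase, "N"s are
--     # replaced immediately; afterwards consecutive "N"s are withheld in a pending counter
--     # (flushed as plain "N"s when a non-"N" follows), so the pending run left at the end
--     # is exactly the trailing run, replaced from the tail of the sequence.
--     out = []
--     lead = True
--     run = 0
--     for i, cs in enumerate(cssplit):
--         if lead: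
--             if cs == "N":
--                 out.append("=" + sequence[i])
--                 continue
--             lead = False
--         if cs == "N":
--             run += 1
--         else:
--             out.extend(["N"] * run)
--             run = 0
--             out.append(cs)
--     m = len(sequence)
--     for k in range(run):
--         out.append("=" + sequence[m - run + k])
--     return out
-- ===== Notes on version B (the rewrite author's own statement) =====
-- stated objective: alternative
-- what changed: B is a single forward pass with a state machine (leading-phase flag plus a pending-'N' run counter flushed as plain 'N's when a non-'N' appears), followed by one tail loop replacing the leftover pending run from the end of the sequence; A makes two staged passes with deepcopy, in-place mutation and two full list reversals, rebuilding sequence[::-1] on every trailing iteration.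
import Mathlib
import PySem

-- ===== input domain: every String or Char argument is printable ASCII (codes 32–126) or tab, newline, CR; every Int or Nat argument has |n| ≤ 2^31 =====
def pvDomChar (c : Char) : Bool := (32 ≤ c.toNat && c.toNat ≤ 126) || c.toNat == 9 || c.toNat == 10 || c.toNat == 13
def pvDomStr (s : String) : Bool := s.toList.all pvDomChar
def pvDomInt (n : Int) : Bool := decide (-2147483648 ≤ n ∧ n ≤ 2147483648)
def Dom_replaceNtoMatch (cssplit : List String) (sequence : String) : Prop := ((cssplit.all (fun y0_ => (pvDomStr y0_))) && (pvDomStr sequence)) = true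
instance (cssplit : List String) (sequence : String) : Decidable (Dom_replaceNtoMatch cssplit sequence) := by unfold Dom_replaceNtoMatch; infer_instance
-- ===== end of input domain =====

-- B replaces A's two staged mutate-reverse passes (which rebuild sequence[::-1] on every
-- trailing iteration) by ONE forward pass with a state machine: a leading-phase flag and a
-- pending-"N" run counter, flushed as plain "N"s at each non-"N"; the pending run left at
-- the end is the trailing run, replaced from the tail of the sequence in one final loop.

-- ===== PORT A =====
-- sequence[::-1]  (exact: PySem.Str.slice? with step -1 is total for step ≠ 0)
def pvRevStr (s : String) : String := (PySem.Str.slice? s none none (-1)).getD ""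

-- "=" + sequence[i]  ("" appended when the index is out of range — outside Pre_, where Python raises)
def pvRepl (s : String) (i : Nat) : String := String.ofList ('=' :: (PySem.Str.pyGet? s (i : Int)).toList)

-- first loop: replace the leading "N"s, break at the first non-"N"
def loopL (xs : List String) (seq : String) (i : Nat) : List String :=
  match xs with
  | [] => []
  | cs :: rest => if cs ≠ "N" then cs :: rest else pvRepl seq i :: loopL rest seq (i + 1)

-- second loop over the reversed list; sequence[::-1] recomputed in the body as in A
def loopR (xs : List String) (seq : String) (i : Nat) : List String :=
  match xs with
  | [] => []
  | cs :: rest => if cs ≠ "N" then cs :: rest else pvRepl (pvRevStr seq) i :: loopR rest seq (i + 1)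

def replaceNtoMatch (cssplit : List String) (sequence : String) : List String :=
  ((loopR ((loopL cssplit sequence 0).reverse) sequence 0)).reverse

-- ===== PORT B =====
-- "=" + sequence[j] with a Python int index (j may be negative outside Pre_; "" when out of range)
def pvReplI (s : String) (j : Int) : String := String.ofList ('=' :: (PySem.Str.pyGet? s j).toList)

-- Source B's single for-loop: state = (accumulated output, leading-phase flag, pending-"N" count)
def loopB (seq : String) : List String → Nat → List String → Bool → Nat → List String × Nat
  | [], _, out, _, run => (out, run)
  | cs :: rest, i, out, lead, run =>
    if lead then
      if cs = "N" then
        loopB seq rest (i + 1) (out ++ [pvRepl seq i]) true run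
      else if cs = "N" then
        loopB seq rest (i + 1) out false (run + 1)
      else
        loopB seq rest (i + 1) (out ++ List.replicate run "N" ++ [cs]) false 0
    else if cs = "N" then
      loopB seq rest (i + 1) out false (run + 1)
    else
      loopB seq rest (i + 1) (out ++ List.replicate run "N" ++ [cs]) false 0

def replaceNtoMatch_alt (cssplit : List String) (sequence : String) : List String :=
  let r := loopB sequence cssplit 0 [] true 0
  let m : Int := PySem.Str.len sequence
  r.1 ++ (List.range r.2).map (fun (k : Nat) => pvReplI sequence (m - (r.2 : Int) + (k : Int)))

-- ===== PRECONDITION & SPEC =====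
-- Pre_ excludes exactly the inputs where A raises IndexError: a leading or trailing "N" run
-- longer than the sequence (sequence[i] / sequence[::-1][i] out of range).
def Pre_replaceNtoMatch (cssplit : List String) (sequence : String) : Prop :=
  (cssplit.takeWhile (fun cs => cs == "N")).length ≤ PySem.Str.len sequence ∧
  min (cssplit.length - (cssplit.takeWhile (fun cs => cs == "N")).length)
      ((cssplit.reverse.takeWhile (fun cs => cs == "N")).length) ≤ PySem.Str.len sequence

instance (cssplit : List String) (sequence : String) : Decidable (Pre_replaceNtoMatch cssplit sequence) := by
  unfold Pre_replaceNtoMatch; infer_instance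

def pvWitness_replaceNtoMatch : List String × String := (["N", "*AC", "N"], "GAT")

def Spec_replaceNtoMatch (cssplit : List String) (sequence : String) (out : List String) : Prop := out = replaceNtoMatch_alt cssplit sequence
instance (cssplit : List String) (sequence : String) (out : List String) : Decidable (Spec_replaceNtoMatch cssplit sequence out) := by unfold Spec_replaceNtoMatch; infer_instance

-- ===== CLAIM (what is proved, stated in full; the proofs are below) =====
def Claim_equal_replaceNtoMatch : Prop := ∀ (cssplit : List String) (sequence : String), Dom_replaceNtoMatch cssplit sequence → Pre_replaceNtoMatch cssplit sequence → Spec_replaceNtoMatch cssplit sequence (replaceNtoMatch cssplit sequence)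

-- ===== LEMMAS AND PROOFS =====

-- length of the leading run of "N" (proof-side notion; both characterizations use it)
def leadRun : List String → Nat
  | [] => 0
  | cs :: rest => if cs ≠ "N" then 0 else leadRun rest + 1

theorem pvRepl_ne_N (s : String) (i : Nat) : pvRepl s i ≠ "N" := by
  intro h
  have h2 := congrArg String.toList h
  simp [pvRepl] at h2

theorem leadRun_le (xs : List String) : leadRun xs ≤ xs.length := by
  induction xs with
  | nil => simp [leadRun]
  | cons x r ih =>
    by_cases hx : x ≠ "N"
    · simp [leadRun, hx]
    · simp [leadRun, hx]
      omega

theorem loopL_spec (xs : List String) (seq : String) (i : Nat) :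
    loopL xs seq i = (List.range (leadRun xs)).map (fun k => pvRepl seq (i + k)) ++ xs.drop (leadRun xs) := by
  induction xs generalizing i with
  | nil => simp [loopL, leadRun]
  | cons x r ih =>
    by_cases hx : x ≠ "N"
    · simp [loopL, leadRun, hx]
    · simp only [loopL, leadRun, if_neg hx, ih]
      rw [List.range_succ_eq_map]
      simp [List.map_map, Function.comp]
      intro a _
      congr 1
      omega

theorem loopR_spec (xs : List String) (seq : String) (i : Nat) :
    loopR xs seq i = (List.range (leadRun xs)).map (fun k => pvRepl (pvRevStr seq) (i + k)) ++ xs.drop (leadRun xs) := by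
  induction xs generalizing i with
  | nil => simp [loopR, leadRun]
  | cons x r ih =>
    by_cases hx : x ≠ "N"
    · simp [loopR, leadRun, hx]
    · simp only [loopR, leadRun, if_neg hx, ih]
      rw [List.range_succ_eq_map]
      simp [List.map_map, Function.comp]
      intro a _
      congr 1
      omega

theorem leadRun_eq_zero (xs : List String) (h : ∀ x ∈ xs, x ≠ "N") : leadRun xs = 0 := by
  cases xs with
  | nil => rfl
  | cons x r => simp [leadRun, h x (by simp)]

theorem leadRun_append_of_lt (xs ys : List String) (h : leadRun xs < xs.length) :
    leadRun (xs ++ ys) = leadRun xs := by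
  induction xs with
  | nil => simp [leadRun] at h
  | cons x r ih =>
    by_cases hx : x ≠ "N"
    · simp [leadRun, hx]
    · simp only [List.cons_append, leadRun, if_neg hx]
      simp only [leadRun, if_neg hx, List.length_cons] at h
      rw [ih (by omega)]

theorem all_N_of_leadRun_eq_length (xs : List String) (h : leadRun xs = xs.length) :
    ∀ x ∈ xs, x = "N" := by
  induction xs with
  | nil => simp
  | cons x r ih =>
    simp only [leadRun, List.length_cons] at h
    by_cases hx : x ≠ "N"
    · rw [if_pos hx] at h
      have := leadRun_le r
      omega
    · rw [if_neg hx] at h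
      have hx2 : x = "N" := by simpa using hx
      intro y hy
      rcases List.mem_cons.mp hy with hy | hy
      · rw [hy, hx2]
      · exact ih (by omega) y hy

theorem leadRun_eq_length_of_all (xs : List String) (h : ∀ x ∈ xs, x = "N") :
    leadRun xs = xs.length := by
  induction xs with
  | nil => rfl
  | cons x r ih =>
    have hx : x = "N" := h x (by simp)
    simp [leadRun, hx, ih (fun y hy => h y (by simp [hy]))]

theorem head_drop_leadRun (xs : List String) (h t) (hd : xs.drop (leadRun xs) = h :: t) :
    h ≠ "N" := by
  induction xs with
  | nil => simp [leadRun] at hd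
  | cons x r ih =>
    by_cases hx : x ≠ "N"
    · simp [leadRun, hx] at hd
      exact hd.1 ▸ hx
    · simp only [leadRun, if_neg hx, List.drop_succ_cons] at hd
      exact ih hd

theorem leadRun_takeWhile (xs : List String) :
    (xs.takeWhile (fun cs => cs == "N")).length = leadRun xs := by
  induction xs with
  | nil => rfl
  | cons x r ih =>
    by_cases hx : x = "N"
    · simp [hx, leadRun, ih]
    · simp [hx, leadRun]

theorem leadRun_append_full (xs ys : List String) (h : leadRun xs = xs.length) :
    leadRun (xs ++ ys) = xs.length + leadRun ys := by
  induction xs with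
  | nil => simp
  | cons x r ih =>
    simp only [leadRun, List.length_cons] at h
    by_cases hx : x ≠ "N"
    · rw [if_pos hx] at h; have := leadRun_le r; omega
    · rw [if_neg hx] at h
      rw [List.cons_append]
      simp only [leadRun, if_neg hx, List.length_cons]
      rw [ih (by omega)]
      omega

-- trailing-run characterization of Source B's loop after the leading phase ended
theorem loopB_nl (seq : String) (ys : List String) (i : Nat) (out : List String) (run : Nat) :
    loopB seq ys i out false run =
      if ∀ y ∈ ys, y = "N" then (out, run + ys.length)
      else (out ++ List.replicate run "N" ++ ys.take (ys.length - leadRun ys.reverse),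
            leadRun ys.reverse) := by
  induction ys generalizing i out run with
  | nil => simp [loopB]
  | cons cs rest ih =>
    by_cases hcs : cs = "N"
    · simp only [loopB, Bool.false_eq_true, if_false, if_pos hcs]
      rw [ih]
      by_cases hall : ∀ y ∈ rest, y = "N"
      · rw [if_pos hall, if_pos (by
          intro y hy
          rcases List.mem_cons.mp hy with h | h
          · exact h.trans hcs
          · exact hall y h)]
        simp; omega
      · rw [if_neg hall, if_neg (fun h => hall (fun y hy => h y (by simp [hy])))]
        have hlt : leadRun rest.reverse < rest.length := by
          rcases lt_or_eq_of_le (by simpa using leadRun_le rest.reverse) with h | h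
          · exact h
          · exact absurd (fun y hy => all_N_of_leadRun_eq_length rest.reverse
                (by simpa using h) y (List.mem_reverse.mpr hy)) hall
        have hq : leadRun ((cs :: rest).reverse) = leadRun rest.reverse := by
          rw [List.reverse_cons, leadRun_append_of_lt _ _ (by simpa using hlt)]
        rw [hq]
        have htake : (cs :: rest).take ((cs :: rest).length - leadRun rest.reverse)
            = cs :: rest.take (rest.length - leadRun rest.reverse) := by
          simp only [List.length_cons]
          rw [Nat.succ_sub (le_of_lt hlt)]
          rfl
        rw [htake, hcs]
        simp [List.replicate_succ', List.append_assoc]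
    · simp only [loopB, Bool.false_eq_true, if_false, if_neg hcs]
      rw [ih]
      have hnotall : ¬ ∀ y ∈ (cs :: rest), y = "N" := fun h => hcs (h cs (by simp))
      rw [if_neg hnotall]
      by_cases hall : ∀ y ∈ rest, y = "N"
      · rw [if_pos hall]
        have hqrest : leadRun rest.reverse = rest.reverse.length :=
          leadRun_eq_length_of_all _ (fun y hy => hall y (List.mem_reverse.mp hy))
        have hq : leadRun ((cs :: rest).reverse) = rest.length := by
          rw [List.reverse_cons, leadRun_append_full rest.reverse [cs] hqrest]
          simp [leadRun, hcs]
        rw [hq]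
        simp
      · rw [if_neg hall]
        have hlt : leadRun rest.reverse < rest.length := by
          rcases lt_or_eq_of_le (by simpa using leadRun_le rest.reverse) with h | h
          · exact h
          · exact absurd (fun y hy => all_N_of_leadRun_eq_length rest.reverse
                (by simpa using h) y (List.mem_reverse.mpr hy)) hall
        have hq : leadRun ((cs :: rest).reverse) = leadRun rest.reverse := by
          rw [List.reverse_cons, leadRun_append_of_lt _ _ (by simpa using hlt)]
        rw [hq]
        have htake : (cs :: rest).take ((cs :: rest).length - leadRun rest.reverse)
            = cs :: rest.take (rest.length - leadRun rest.reverse) := by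
          simp only [List.length_cons]
          rw [Nat.succ_sub (le_of_lt hlt)]
          rfl
        rw [htake]
        simp [List.append_assoc]

theorem loopB_lead (seq : String) (xs : List String) (i : Nat) (out : List String) :
    loopB seq xs i out true 0 =
      loopB seq (xs.drop (leadRun xs)) (i + leadRun xs)
        (out ++ (List.range (leadRun xs)).map (fun k => pvRepl seq (i + k))) false 0 := by
  induction xs generalizing i out with
  | nil => simp [loopB, leadRun]
  | cons cs rest ih =>
    by_cases hcs : cs = "N"
    · subst hcs
      have hlr : leadRun ("N" :: rest) = leadRun rest + 1 := by simp [leadRun]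
      rw [hlr]
      simp only [loopB, if_true, List.drop_succ_cons]
      rw [ih]
      have hidx : i + 1 + leadRun rest = i + (leadRun rest + 1) := by omega
      have hout : out ++ [pvRepl seq i] ++ (List.range (leadRun rest)).map (fun k => pvRepl seq (i + 1 + k))
          = out ++ (List.range (leadRun rest + 1)).map (fun k => pvRepl seq (i + k)) := by
        rw [List.range_succ_eq_map, List.map_cons, List.map_map, List.append_assoc]
        have hfun : (fun k => pvRepl seq (i + k)) ∘ (fun j => j + 1) = fun k => pvRepl seq (i + 1 + k) := by
          funext a
          simp only [Function.comp_apply]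
          congr 1
          omega
        rw [hfun]
        simp
      rw [hidx, hout]
    · have h0 : leadRun (cs :: rest) = 0 := by simp [leadRun, hcs]
      rw [h0]
      simp only [List.drop_zero, List.range_zero, List.map_nil, List.append_nil, Nat.add_zero]
      simp [loopB, hcs]

theorem rev_toList (s : String) : (pvRevStr s).toList = s.toList.reverse := by
  simp [pvRevStr, PySem.Str.slice?_none_none_neg_one]

-- the two tail replacements agree element by element when the trailing run fits the sequence
theorem trail_eq (s : String) (q : Nat) (hq : (q : Int) ≤ PySem.Str.len s) :
    ((List.range q).map (fun k => pvRepl (pvRevStr s) (0 + k))).reverse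
      = (List.range q).map (fun (k : Nat) => pvReplI s (PySem.Str.len s - (q : Int) + (k : Int))) := by
  have hqL : q ≤ s.toList.length := by
    simp only [PySem.Str.len_eq] at hq
    exact_mod_cast hq
  apply List.ext_getElem
  · simp
  · intro k hk1 hk2
    simp only [List.length_reverse, List.length_map, List.length_range] at hk1
    rw [List.getElem_reverse]
    simp only [List.getElem_map, List.getElem_range, List.length_map, List.length_range]
    unfold pvRepl pvReplI
    have h1 : PySem.Str.pyGet? (pvRevStr s) (((0 + (q - 1 - k)) : Nat) : Int)
        = s.toList[s.toList.length - q + k]? := by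
      rw [PySem.Str.pyGet?_natCast, rev_toList,
        List.getElem?_reverse (by omega)]
      congr 1
      omega
    have hcast : PySem.Str.len s - (q : Int) + (k : Int)
        = ((s.toList.length - q + k : Nat) : Int) := by
      simp only [PySem.Str.len_eq]
      omega
    have h2 : PySem.Str.pyGet? s (PySem.Str.len s - (q : Int) + (k : Int))
        = s.toList[s.toList.length - q + k]? := by
      rw [hcast, PySem.Str.pyGet?_natCast]
    rw [h1, h2]

theorem ports_eq (cssplit : List String) (sequence : String)
    (hpre : Pre_replaceNtoMatch cssplit sequence) :
    replaceNtoMatch cssplit sequence = replaceNtoMatch_alt cssplit sequence := by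
  obtain ⟨hpre1, hpre2⟩ := hpre
  rw [leadRun_takeWhile] at hpre1 hpre2
  unfold replaceNtoMatch replaceNtoMatch_alt
  dsimp only
  set p := leadRun cssplit with hp
  have hple : p ≤ cssplit.length := leadRun_le cssplit
  rw [loopL_spec, ← hp, loopB_lead, ← hp]
  set ys := cssplit.drop p with hys
  set leads := (List.range p).map (fun k => pvRepl sequence (0 + k)) with hleads
  rw [loopB_nl]
  by_cases hnil : ys = []
  · -- the whole list is "N": the second loop of A replaces nothing, B's pending run is empty
    rw [if_pos (by intro y hy; rw [hnil] at hy; cases hy)]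
    simp only [hnil, List.append_nil, List.nil_append]
    rw [loopR_spec]
    rw [leadRun_eq_zero _ (by
      intro x hx
      rw [List.mem_reverse] at hx
      simp only [hleads, List.mem_map] at hx
      obtain ⟨k, -, hk⟩ := hx
      exact hk ▸ pvRepl_ne_N sequence (0 + k))]
    simp
  · obtain ⟨h, t, hR⟩ := List.exists_cons_of_ne_nil hnil
    have hhN : h ≠ "N" := head_drop_leadRun cssplit h t (hys ▸ hR)
    have hnotall : ¬ ∀ y ∈ ys, y = "N" := by
      intro hall; exact hhN (hall h (by rw [hR]; simp))
    rw [if_neg hnotall]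
    set q := leadRun ys.reverse with hq
    have hqlt : q < ys.length := by
      rcases lt_or_eq_of_le (by simpa using leadRun_le ys.reverse) with hlt | heq
      · exact hlt
      · exact absurd (fun y hy => all_N_of_leadRun_eq_length ys.reverse
            (by simpa using heq) y (List.mem_reverse.mpr hy)) hnotall
    -- q is also the trailing run of the full list, so Pre_ bounds it by the sequence length
    have hsplit : cssplit.reverse = ys.reverse ++ (cssplit.take p).reverse := by
      conv_lhs => rw [← List.take_append_drop p cssplit]
      rw [List.reverse_append, hys]
    have hqfull : leadRun cssplit.reverse = q := by
      rw [hsplit, leadRun_append_of_lt _ _ (by simpa using hqlt)]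
    have hyslen : ys.length = cssplit.length - p := by
      rw [hys]; exact List.length_drop
    have hqm : (q : Int) ≤ PySem.Str.len sequence := by
      rw [leadRun_takeWhile, hqfull] at hpre2
      have : min (cssplit.length - p) q ≤ PySem.Str.len sequence := hpre2
      have hqle : q ≤ cssplit.length - p := by omega
      calc (q : Int) = ((min (cssplit.length - p) q : Nat) : Int) := by
            rw [min_eq_right hqle]
          _ ≤ PySem.Str.len sequence := this
    -- A's side: characterize the reversed second pass
    rw [List.reverse_append, loopR_spec]
    rw [leadRun_append_of_lt _ _ (by simpa using hqlt), ← hq]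
    rw [List.drop_append_of_le_length (by rw [List.length_reverse]; omega)]
    rw [List.reverse_append, List.reverse_append, List.reverse_reverse]
    rw [List.drop_reverse, List.reverse_reverse]
    -- now both sides are leads ++ take ++ tail; the tails agree by trail_eq
    rw [trail_eq sequence q hqm]
    simp [List.append_assoc]
-- ===== VERDICT (by name: the statement is the Claim_ definition above) =====
theorem replaceNtoMatch_spec : Claim_equal_replaceNtoMatch := by
  intro cssplit sequence _ hpre
  unfold Spec_replaceNtoMatch
  exact ports_eq cssplit sequence hpre
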